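-- pv_equiv track=rewrite | github.com/mkettn/byzantine | byzantine/fastingcalendar.py | _expand_weekday_rules
-- ===== SOURCE A (Python) =====
-- def _expand_weekday_rules(rules: dict) -> dict:
--     """Expand weekday range rules like 'mon..sun' to individual days."""
--     if not isinstance(rules, dict):
--         return rules
--     ABBR2NUM = {
--         "mon": 0,
--         "tue": 1,
--         "wed": 2,
--         "thu": 3,
--         "fri": 4,
--         "sat": 5,
--         "sun": 6,
--     }
--     expanded = {}
--     for key, value in rules.items():
--         if ".." in key:
--             start_wd, end_wd = key.split("..")
--             start_num = ABBR2NUM[start_wd.lower()]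
--             end_num = ABBR2NUM[end_wd.lower()]
--             if start_num <= end_num:
--                 for i in range(start_num, end_num + 1):
--                     for wd_name, wd_num in ABBR2NUM.items():
--                         if wd_num == i:
--                             expanded[wd_name] = value
--                             break
--             else:
--                 for i in range(start_num, 7):
--                     for wd_name, wd_num in ABBR2NUM.items():
--                         if wd_num == i:
--                             expanded[wd_name] = value
--                             break
--                 for i in range(0, end_num + 1):
--                     for wd_name, wd_num in ABBR2NUM.items():
--                         if wd_num == i:
--                             expanded[wd_name] = value
--                             break
--         elif "," in key:
--             for wd in key.split(","):
--                 expanded[wd.strip()] = value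
--         else:
--             expanded[key] = value
--     return expanded
-- ===== SOURCE B (Python) =====
-- def _expand_weekday_rules(rules: dict) -> dict:
--     """Expand weekday range rules like 'mon..sun' to individual days."""
--     if not isinstance(rules, dict):
--         return rules
--     DAYS = ["mon", "tue", "wed", "thu", "fri", "sat", "sun"]
--
--     def targets(key):
--         if ".." in key:
--             a, b = key.split("..")
--             i = DAYS.index(a.lower())
--             j = DAYS.index(b.lower())
--             return (DAYS + DAYS)[i : i + (j - i) % 7 + 1]
--         if "," in key:
--             return [wd.strip() for wd in key.split(",")]
--         return [key]
--
--     return dict((day, value) for key, value in rules.items() for day in targets(key))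
-- ===== Notes on version B (the rewrite author's own statement) =====
-- stated objective: alternative
-- what changed: B maps each key once to its list of target day names (the '..' case as a single slice of a doubled DAYS list via modular length, replacing A's two-branch range split with nested linear scans), flattens all rules to (day, value) pairs, and builds the result with one dict(...) constructor call instead of A's incremental per-branch insertion loops.
import Mathlib
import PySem

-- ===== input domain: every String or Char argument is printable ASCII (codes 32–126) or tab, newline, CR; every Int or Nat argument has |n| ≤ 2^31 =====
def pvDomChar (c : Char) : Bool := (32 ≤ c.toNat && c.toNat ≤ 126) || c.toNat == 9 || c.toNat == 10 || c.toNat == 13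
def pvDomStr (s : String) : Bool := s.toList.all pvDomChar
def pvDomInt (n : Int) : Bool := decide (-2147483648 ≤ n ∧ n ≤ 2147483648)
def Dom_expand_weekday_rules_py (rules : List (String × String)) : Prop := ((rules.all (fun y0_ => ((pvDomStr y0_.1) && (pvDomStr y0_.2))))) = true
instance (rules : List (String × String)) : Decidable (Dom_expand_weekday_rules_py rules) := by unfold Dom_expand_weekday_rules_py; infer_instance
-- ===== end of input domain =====

-- B maps each key once to its list of target day names (the '..' case as one slice of a doubled
-- DAYS list), flattens all rules to (day, value) pairs, and builds the dict in a single
-- dict(...) constructor pass — a different decomposition; return-value equivalence only.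

-- ===== PORT A =====
def pvAbbr2NumList : List (String × Int) :=
  [("mon", 0), ("tue", 1), ("wed", 2), ("thu", 3), ("fri", 4), ("sat", 5), ("sun", 6)]

-- inner "for wd_name, wd_num in ABBR2NUM.items(): if wd_num == i: …; break"
def pvFindInsert (i : Int) (value : String) (exp : PySem.Dict String String) :
    List (String × Int) → PySem.Dict String String
  | [] => exp
  | (name, num) :: rest =>
    if num == i then exp.insert name value else pvFindInsert i value exp rest

-- loop body of A; the two-part unpacking 'start_wd, end_wd = key.split("..")' is rendered with
-- getD; Pre_ guarantees the split has exactly two pieces (otherwise Python raises).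
def pvStepA (exp : PySem.Dict String String) (kv : String × String) : PySem.Dict String String :=
  let key := kv.1
  let value := kv.2
  if PySem.Str.isIn ".." key then
    let parts := (PySem.Str.split? key "..").getD []
    let start_wd := parts.getD 0 ""
    let end_wd := parts.getD 1 ""
    let start_num := (PySem.Dict.mk pvAbbr2NumList).getD (PySem.Str.lower start_wd) 0
    let end_num := (PySem.Dict.mk pvAbbr2NumList).getD (PySem.Str.lower end_wd) 0
    if start_num ≤ end_num then
      (PySem.List.pyRange start_num (end_num + 1) 1).foldl
        (fun d i => pvFindInsert i value d pvAbbr2NumList) exp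
    else
      (PySem.List.pyRange 0 (end_num + 1) 1).foldl
        (fun d i => pvFindInsert i value d pvAbbr2NumList)
        ((PySem.List.pyRange start_num 7 1).foldl
          (fun d i => pvFindInsert i value d pvAbbr2NumList) exp)
  else if PySem.Str.isIn "," key then
    ((PySem.Str.split? key ",").getD []).foldl
      (fun d wd => d.insert (PySem.Str.strip wd) value) exp
  else
    exp.insert key value

def expand_weekday_rules_py (rules : List (String × String)) : List (String × String) :=
  (rules.foldl pvStepA PySem.Dict.empty).items

-- ===== PORT B =====
def pvDays : List String := ["mon", "tue", "wed", "thu", "fri", "sat", "sun"]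

-- B's helper 'targets': the list of output keys for one rule key (same getD rendering of the
-- two-part unpack as in A's port; Pre_ guarantees split length 2 and valid day names).
def pvTargets (key : String) : List String :=
  if PySem.Str.isIn ".." key then
    let parts := (PySem.Str.split? key "..").getD []
    let i : Int := ((PySem.List.index? pvDays (PySem.Str.lower (parts.getD 0 ""))).getD 0 : Nat)
    let j : Int := ((PySem.List.index? pvDays (PySem.Str.lower (parts.getD 1 ""))).getD 0 : Nat)
    PySem.List.slice (pvDays ++ pvDays) (some i) (some (i + PySem.Int.mod (j - i) 7 + 1))
  else if PySem.Str.isIn "," key then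
    ((PySem.Str.split? key ",").getD []).map PySem.Str.strip
  else
    [key]

-- dict(generator): one pass over the flattened (day, value) pairs
def expand_weekday_rules_py_alt (rules : List (String × String)) : List (String × String) :=
  ((rules.flatMap (fun kv => (pvTargets kv.1).map (fun d => (d, kv.2)))).foldl
    (fun d p => d.insert p.1 p.2) PySem.Dict.empty).items

-- ===== PRECONDITION & SPEC =====
-- Pre_ excludes exactly the inputs on which Python A raises: a key containing ".." that does not
-- split into exactly two pieces (ValueError on unpacking) or whose lowercased pieces are not
-- weekday abbreviations (KeyError on ABBR2NUM lookup).
def Pre_expand_weekday_rules_py (rules : List (String × String)) : Prop :=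
  ∀ p ∈ rules, PySem.Str.isIn ".." p.1 = true →
    ((PySem.Str.split? p.1 "..").getD []).length = 2 ∧
    PySem.Str.lower (((PySem.Str.split? p.1 "..").getD []).getD 0 "") ∈ pvDays ∧
    PySem.Str.lower (((PySem.Str.split? p.1 "..").getD []).getD 1 "") ∈ pvDays
instance (rules : List (String × String)) : Decidable (Pre_expand_weekday_rules_py rules) := by
  unfold Pre_expand_weekday_rules_py; infer_instance

def pvWitness_expand_weekday_rules_py : (List (String × String)) :=
  [("sat..Mon", "x"), ("tue , thu", "y"), ("misc", "z")]

def Spec_expand_weekday_rules_py (rules : List (String × String)) (out : List (String × String)) : Prop := out = expand_weekday_rules_py_alt rules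
instance (rules : List (String × String)) (out : List (String × String)) : Decidable (Spec_expand_weekday_rules_py rules out) := by unfold Spec_expand_weekday_rules_py; infer_instance

-- ===== CLAIM (what is proved, stated in full; the proofs are below) =====
def Claim_equal_expand_weekday_rules_py : Prop := ∀ (rules : List (String × String)), Dom_expand_weekday_rules_py rules → Pre_expand_weekday_rules_py rules → Spec_expand_weekday_rules_py rules (expand_weekday_rules_py rules)

-- ===== LEMMAS AND PROOFS =====

set_option maxHeartbeats 4000000 in
-- For valid lowercased day names, A's ascending/wraparound range pair with inner scan produces the
-- same insert chain as folding the inserts over B's doubled-list slice of target names.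
theorem pvRangeEq (la lb : String) (hla : la ∈ pvDays) (hlb : lb ∈ pvDays)
    (exp : PySem.Dict String String) (v : String) :
    (let start_num := (PySem.Dict.mk pvAbbr2NumList).getD la 0
     let end_num := (PySem.Dict.mk pvAbbr2NumList).getD lb 0
     if start_num ≤ end_num then
       (PySem.List.pyRange start_num (end_num + 1) 1).foldl
         (fun d i => pvFindInsert i v d pvAbbr2NumList) exp
     else
       (PySem.List.pyRange 0 (end_num + 1) 1).foldl
         (fun d i => pvFindInsert i v d pvAbbr2NumList)
         ((PySem.List.pyRange start_num 7 1).foldl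
           (fun d i => pvFindInsert i v d pvAbbr2NumList) exp))
    =
    (let i : Int := ((PySem.List.index? pvDays la).getD 0 : Nat)
     let j : Int := ((PySem.List.index? pvDays lb).getD 0 : Nat)
     (PySem.List.slice (pvDays ++ pvDays) (some i) (some (i + PySem.Int.mod (j - i) 7 + 1))).foldl
       (fun d day => d.insert day v) exp) := by
  fin_cases hla <;> fin_cases hlb <;> rfl

theorem pvStepEq (kv : String × String)
    (h : PySem.Str.isIn ".." kv.1 = true →
      ((PySem.Str.split? kv.1 "..").getD []).length = 2 ∧
      PySem.Str.lower (((PySem.Str.split? kv.1 "..").getD []).getD 0 "") ∈ pvDays ∧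
      PySem.Str.lower (((PySem.Str.split? kv.1 "..").getD []).getD 1 "") ∈ pvDays)
    (exp : PySem.Dict String String) :
    pvStepA exp kv =
      ((pvTargets kv.1).map (fun d => (d, kv.2))).foldl (fun d p => d.insert p.1 p.2) exp := by
  unfold pvStepA pvTargets
  by_cases hin : PySem.Str.isIn ".." kv.1 = true
  · obtain ⟨-, h0, h1⟩ := h hin
    simp only [hin, if_true, List.foldl_map]
    exact pvRangeEq _ _ h0 h1 exp kv.2
  · simp only [Bool.not_eq_true] at hin
    simp only [hin, Bool.false_eq_true, if_false]
    by_cases hc : PySem.Str.isIn "," kv.1 = true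
    · simp only [hc, if_true, List.foldl_map]
    · simp only [Bool.not_eq_true] at hc
      simp only [hc, Bool.false_eq_true, if_false, List.map_cons, List.map_nil,
        List.foldl_cons, List.foldl_nil]

set_option maxHeartbeats 1000000 in
theorem pvFoldEq (rules : List (String × String))
    (h : Pre_expand_weekday_rules_py rules) (exp : PySem.Dict String String) :
    rules.foldl pvStepA exp =
      (rules.flatMap (fun kv => (pvTargets kv.1).map (fun d => (d, kv.2)))).foldl
        (fun d p => d.insert p.1 p.2) exp := by
  induction rules generalizing exp with
  | nil => simp only [List.foldl_nil, List.flatMap_nil]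
  | cons p t ih =>
    simp only [List.foldl_cons, List.flatMap_cons, List.foldl_append]
    rw [pvStepEq p (h p List.mem_cons_self) exp]
    exact ih (fun q hq => h q (List.mem_cons_of_mem p hq)) _

-- ===== VERDICT (by name: the statement is the Claim_ definition above) =====
theorem expand_weekday_rules_py_spec : Claim_equal_expand_weekday_rules_py := by
  intro rules _ hpre
  unfold Spec_expand_weekday_rules_py expand_weekday_rules_py expand_weekday_rules_py_alt
  rw [pvFoldEq rules hpre]
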